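-- pv_equiv track=rewrite | github.com/gmiejski/confluent-documentation-quality | plot_data.py | latest_for_date
-- ===== SOURCE A (Python) =====
-- from typing import List, Tuple
--
-- def latest_for_date(data: List[Tuple[str, List[Tuple[str, int, int]]]]):
--     result = []
--     for record in data:
--         if len(result) > 0 != None and result[-1][0] == record[0]:
--             result[-1] = record
--         else:
--             result.append(record)
--     return result
-- ===== SOURCE B (Python) =====
-- from typing import List, Tuple
--
-- def latest_for_date(data: List[Tuple[str, List[Tuple[str, int, int]]]]):
--     n = len(data)
--     return [r for i, r in enumerate(data)
--             if i == n - 1 or data[i + 1][0] != r[0]]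
-- ===== Notes on version B (the rewrite author's own statement) =====
-- stated objective: idiomatic
-- what changed: Replaces the maintain-and-overwrite result list with a single look-ahead comprehension that keeps a record exactly when it is the last of its consecutive same-key run (next record absent or differently keyed).
import Mathlib
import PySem

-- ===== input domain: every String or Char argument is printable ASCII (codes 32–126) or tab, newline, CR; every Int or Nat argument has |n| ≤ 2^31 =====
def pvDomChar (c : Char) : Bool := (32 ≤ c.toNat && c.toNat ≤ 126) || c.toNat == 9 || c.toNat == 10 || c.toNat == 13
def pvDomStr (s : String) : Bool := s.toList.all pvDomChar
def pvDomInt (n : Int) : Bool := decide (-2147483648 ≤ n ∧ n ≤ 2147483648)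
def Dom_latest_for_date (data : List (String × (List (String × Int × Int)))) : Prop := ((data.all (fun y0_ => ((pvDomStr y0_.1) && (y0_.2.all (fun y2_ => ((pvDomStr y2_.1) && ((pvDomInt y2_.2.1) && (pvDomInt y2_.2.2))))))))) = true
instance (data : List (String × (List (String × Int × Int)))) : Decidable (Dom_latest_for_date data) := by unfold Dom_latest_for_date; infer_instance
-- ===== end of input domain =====

-- B replaces A's maintain-and-overwrite result list with a look-ahead pass
-- that keeps each record iff its successor has a different key (idiomatic; same cost).


-- ===== PORT A =====
-- one loop step: `if len(result) > 0 != None and result[-1][0] == record[0]: result[-1] = record else: result.append(record)`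
-- (the chained comparison `len(result) > 0 != None` is `len(result) > 0 and 0 != None`, i.e. just nonemptiness)
def pvStep_latest_for_date (result : List (String × (List (String × Int × Int))))
    (record : String × (List (String × Int × Int))) : List (String × (List (String × Int × Int))) :=
  match result.getLast? with
  | some l => if l.1 = record.1 then result.dropLast ++ [record] else result ++ [record]
  | none => result ++ [record]

def latest_for_date (data : List (String × (List (String × Int × Int)))) : List (String × (List (String × Int × Int))) :=
  data.foldl pvStep_latest_for_date []

-- ===== PORT B =====
-- look-ahead recursion: keep a record iff the next record is absent or has a different key
def latest_for_date_alt (data : List (String × (List (String × Int × Int)))) : List (String × (List (String × Int × Int))) :=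
  match data with
  | [] => []
  | [x] => [x]
  | x :: y :: rest =>
      if y.1 = x.1 then latest_for_date_alt (y :: rest)
      else x :: latest_for_date_alt (y :: rest)

-- ===== PRECONDITION & SPEC =====
def Spec_latest_for_date (data : List (String × (List (String × Int × Int)))) (out : List (String × (List (String × Int × Int)))) : Prop := out = latest_for_date_alt data
instance (data : List (String × (List (String × Int × Int)))) (out : List (String × (List (String × Int × Int)))) : Decidable (Spec_latest_for_date data out) := by unfold Spec_latest_for_date; infer_instance

-- ===== CLAIM (what is proved, stated in full; the proofs are below) =====
def Claim_equal_latest_for_date : Prop := ∀ (data : List (String × (List (String × Int × Int)))), Dom_latest_for_date data → Spec_latest_for_date data (latest_for_date data)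

-- ===== LEMMAS AND PROOFS =====
-- A's step never looks below the last element: a committed prefix passes through the fold untouched.
theorem pv_foldl_concat (ys : List (String × (List (String × Int × Int))))
    (l : String × (List (String × Int × Int)))
    (data : List (String × (List (String × Int × Int)))) :
    data.foldl pvStep_latest_for_date (ys ++ [l]) = ys ++ data.foldl pvStep_latest_for_date [l] := by
  induction data generalizing ys l with
  | nil => simp
  | cons x rest ih =>
      simp only [List.foldl_cons, pvStep_latest_for_date]
      by_cases h : l.1 = x.1
      · simp [h, ih]
      · have h1 := ih (ys ++ [l]) x
        have h2 := ih [l] x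
        simp [h] at h1 h2 ⊢
        rw [h1, h2]

-- A's fold seeded with one committed record computes B's look-ahead recursion.
theorem pv_foldl_seed (l : String × (List (String × Int × Int)))
    (data : List (String × (List (String × Int × Int)))) :
    data.foldl pvStep_latest_for_date [l] = latest_for_date_alt (l :: data) := by
  induction data generalizing l with
  | nil => simp [latest_for_date_alt]
  | cons x rest ih =>
      simp only [List.foldl_cons, pvStep_latest_for_date, latest_for_date_alt]
      by_cases h : l.1 = x.1
      · simp [h, ih]
      · have hn : ¬ x.1 = l.1 := fun he => h he.symm
        have hc := pv_foldl_concat [l] x rest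
        simp [h, hn] at hc ⊢
        rw [hc, ih]

-- ===== VERDICT (by name: the statement is the Claim_ definition above) =====
theorem latest_for_date_spec : Claim_equal_latest_for_date := by
  intro data _
  unfold Spec_latest_for_date latest_for_date
  cases data with
  | nil => rfl
  | cons x rest =>
      simp only [List.foldl_cons, pvStep_latest_for_date, List.getLast?_nil, List.nil_append]
      exact pv_foldl_seed x rest
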